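-- pv_equiv track=rewrite | github.com/hash-anmol/Open-reader | src/kitten_audiobook/tts/synthesis.py | compute_chapter_ranges
-- ===== SOURCE A (Python) =====
-- from typing import Iterable, List, Optional, Dict, Any, Tuple
--
-- def compute_chapter_ranges(chapter_breaks: List[bool], total_chunks: int) -> List[Tuple[int, int]]:
--     """Convert per-chunk break flags into inclusive chapter (start, end) ranges.
--
--     Rules:
--     - A True at index i indicates a break AFTER chunk i.
--     - The final chapter always closes at total_chunks - 1.
--     - Trailing True is ignored (does not create empty chapter).
--     """
--     if total_chunks <= 0:
--         return []
--     ranges: List[Tuple[int, int]] = []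
--     start = 0
--     for i in range(total_chunks):
--         # If there is a break after i, close current chapter at i
--         if i < len(chapter_breaks) and chapter_breaks[i]:
--             end = i
--             if end >= start:
--                 ranges.append((start, end))
--             start = i + 1
--     # Close the final chapter (even if start == total_chunks this yields empty; guard it)
--     if start <= total_chunks - 1:
--         ranges.append((start, total_chunks - 1))
--     return ranges
-- ===== SOURCE B (Python) =====
-- from typing import List, Tuple
--
-- def compute_chapter_ranges(chapter_breaks: List[bool], total_chunks: int) -> List[Tuple[int, int]]:
--     if total_chunks <= 0:
--         return []
--     # chapter end indices: every flagged chunk, plus the forced final end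
--     ends = [i for i, flag in enumerate(chapter_breaks[:total_chunks]) if flag]
--     ends.append(total_chunks - 1)
--     # each chapter starts right after the previous one's end
--     starts = [0] + [e + 1 for e in ends[:-1]]
--     if starts[-1] > total_chunks - 1:  # trailing break would create an empty final chapter
--         starts.pop(); ends.pop()
--     return list(zip(starts, ends))
-- ===== Notes on version B (the rewrite author's own statement) =====
-- stated objective: alternative
-- what changed: B builds the whole end-index list (flagged chunks plus the forced final end) and derives the start list as its shifted successor, zipping the two lists into ranges, instead of A's single accumulator scan over all chunk indices carrying start/end state.
import Mathlib
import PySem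

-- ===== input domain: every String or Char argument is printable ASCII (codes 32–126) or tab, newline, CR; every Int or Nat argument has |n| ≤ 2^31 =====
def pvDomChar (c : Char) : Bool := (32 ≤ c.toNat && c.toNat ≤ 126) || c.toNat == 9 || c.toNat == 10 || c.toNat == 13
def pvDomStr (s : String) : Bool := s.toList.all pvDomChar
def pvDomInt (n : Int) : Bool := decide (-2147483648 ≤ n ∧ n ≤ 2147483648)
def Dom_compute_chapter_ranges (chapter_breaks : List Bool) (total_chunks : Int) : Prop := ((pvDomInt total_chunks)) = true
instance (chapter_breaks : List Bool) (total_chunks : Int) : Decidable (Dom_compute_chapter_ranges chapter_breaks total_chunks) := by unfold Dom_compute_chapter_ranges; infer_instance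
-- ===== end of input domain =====

-- B builds the end-index list (flagged chunks plus the forced final end), derives the start list as its shifted successor, and zips the two; A scans all chunk indices with an accumulator (objective: alternative).
-- ===== PORT A =====
def compute_chapter_ranges (chapter_breaks : List Bool) (total_chunks : Int) : List (Int × Int) :=
  if total_chunks ≤ 0 then []
  else
    let st := (PySem.List.pyRange 0 total_chunks).foldl
      (fun (s : List (Int × Int) × Int) i =>
        if i < (chapter_breaks.length : Int) ∧ PySem.List.pyGetD chapter_breaks i false = true then
          (if i ≥ s.2 then s.1 ++ [(s.2, i)] else s.1, i + 1)
        else s) ([], 0)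
    if st.2 ≤ total_chunks - 1 then st.1 ++ [(st.2, total_chunks - 1)] else st.1

-- ===== PORT B =====
def compute_chapter_ranges_alt (chapter_breaks : List Bool) (total_chunks : Int) : List (Int × Int) :=
  if total_chunks ≤ 0 then []
  else
    let ends := ((PySem.List.enumerate (PySem.List.slice chapter_breaks none (some total_chunks))).filter
        (fun p => p.2)).map (fun p => p.1) ++ [total_chunks - 1]
    let starts := 0 :: ends.dropLast.map (· + 1)
    if PySem.List.pyGetD starts (-1) 0 > total_chunks - 1 then
      starts.dropLast.zip ends.dropLast
    else
      starts.zip ends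

-- ===== PRECONDITION & SPEC =====
def Spec_compute_chapter_ranges (chapter_breaks : List Bool) (total_chunks : Int) (out : List (Int × Int)) : Prop := out = compute_chapter_ranges_alt chapter_breaks total_chunks
instance (chapter_breaks : List Bool) (total_chunks : Int) (out : List (Int × Int)) : Decidable (Spec_compute_chapter_ranges chapter_breaks total_chunks out) := by unfold Spec_compute_chapter_ranges; infer_instance

-- ===== CLAIM (what is proved, stated in full; the proofs are below) =====
def Claim_equal_compute_chapter_ranges : Prop := ∀ (chapter_breaks : List Bool) (total_chunks : Int), Dom_compute_chapter_ranges chapter_breaks total_chunks → Spec_compute_chapter_ranges chapter_breaks total_chunks (compute_chapter_ranges chapter_breaks total_chunks)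

-- ===== LEMMAS AND PROOFS =====

-- On a strictly increasing boundary list whose elements all dominate the cursor,
-- A's guarded step (with its end ≥ start test) can drop the guard.
theorem fold_guard_drop (bs : List Int) (r : List (Int × Int)) (p : Int)
    (hall : ∀ b ∈ bs, p ≤ b) (hs : bs.Pairwise (· < ·)) :
    bs.foldl (fun (s : List (Int × Int) × Int) i =>
        (if i ≥ s.2 then s.1 ++ [(s.2, i)] else s.1, i + 1)) (r, p)
    = bs.foldl (fun (s : List (Int × Int) × Int) b => (s.1 ++ [(s.2, b)], b + 1)) (r, p) := by
  induction bs generalizing r p with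
  | nil => rfl
  | cons b bs ih =>
    have hpb : p ≤ b := hall b (List.mem_cons_self ..)
    simp only [List.foldl_cons, ge_iff_le, hpb, if_pos]
    exact ih _ _ (fun x hx => by have := (List.pairwise_cons.mp hs).1 x hx; omega)
      (List.pairwise_cons.mp hs).2

-- The unguarded accumulator fold computes a zip of the shifted start list with the boundary list.
theorem fold_zip (bs : List Int) (r : List (Int × Int)) (p : Int) :
    bs.foldl (fun (s : List (Int × Int) × Int) b => (s.1 ++ [(s.2, b)], b + 1)) (r, p)
    = (r ++ (p :: bs.dropLast.map (· + 1)).zip bs, bs.getLastD (p - 1) + 1) := by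
  induction bs generalizing r p with
  | nil => simp
  | cons b bs ih =>
    rw [List.foldl_cons, ih]
    cases bs with
    | nil => simp
    | cons b' bs' =>
      simp only [List.getLastD_cons, List.dropLast_cons₂, List.map_cons, List.zip_cons_cons,
        List.cons_append, List.append_assoc, List.nil_append]

-- B's boundary extraction (enumerate + filter + project) as a filtered index range.
theorem enum_filter_map (cb : List Bool) (s : Int) :
    ((PySem.List.enumerate cb s).filter (fun p => p.2)).map (fun p => p.1)
    = ((List.range cb.length).filter (fun k => cb.getD k false)).map (fun (k : Nat) => s + (k : Int)) := by
  induction cb generalizing s with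
  | nil => simp [PySem.List.enumerate_nil]
  | cons c cb ih =>
    have h1 : ((fun (k : Nat) => (c :: cb).getD k false) ∘ Nat.succ) = fun k => cb.getD k false := by
      funext k; simp
    rw [PySem.List.enumerate_cons, List.length_cons, List.range_succ_eq_map]
    cases c with
    | false =>
      rw [List.filter_cons_of_neg (by simp), List.filter_cons_of_neg (by simp),
        List.filter_map, h1, ih, List.map_map]
      apply List.map_congr_left
      intro k _
      simp only [Function.comp_apply]
      push_cast
      ring
    | true =>
      rw [List.filter_cons_of_pos (by simp), List.filter_cons_of_pos (by simp),
        List.filter_map, h1, List.map_cons, List.map_cons, ih, List.map_map]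
      refine congrArg₂ _ (by simp) ?_
      apply List.map_congr_left
      intro k _
      simp only [Function.comp_apply]
      push_cast
      ring

-- Bounding the index inside the filter condition truncates the range.
theorem range_filter_min (m n : Nat) (q : Nat → Bool) :
    (List.range n).filter (fun k => decide (k < m) && q k) = (List.range (min n m)).filter q := by
  induction n with
  | zero => simp
  | succ n ih =>
    rw [List.range_succ, List.filter_append, ih]
    by_cases h : n < m
    · have h1 : min (n + 1) m = min n m + 1 := by omega
      have h2 : min n m = n := by omega
      rw [h1, List.range_succ, List.filter_append]
      simp [List.filter_singleton, h, h2]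
    · have h1 : min (n + 1) m = min n m := by omega
      simp [h, h1]

-- The two programs extract the same boundary list.
theorem boundaries_eq (cb : List Bool) (n : Nat) :
    ((PySem.List.enumerate (PySem.List.slice cb none (some (n : Int)))).filter
        (fun p => p.2)).map (fun p => p.1)
    = (PySem.List.pyRange 0 (n : Int) 1).filter
        (fun i => decide (i < (cb.length : Int) ∧ PySem.List.pyGetD cb i false = true)) := by
  rw [PySem.List.slice_to_natCast, enum_filter_map]
  have hrhs : (PySem.List.pyRange 0 (n : Int) 1).filter
      (fun i => decide (i < (cb.length : Int) ∧ PySem.List.pyGetD cb i false = true))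
      = ((List.range n).filter (fun k => decide (k < cb.length) && cb.getD k false)).map
          (fun (k : Nat) => (k : Int)) := by
    rw [PySem.List.pyRange_zero_nat, List.filter_map]
    congr 1
    apply List.filter_congr
    intro k _
    simp [Function.comp]
  rw [hrhs, range_filter_min]
  have hlen : (cb.take n).length = min n cb.length := by simp
  rw [hlen]
  refine congrArg₂ _ (by funext k; simp) ?_
  apply List.filter_congr
  intro k hk
  have hk' : k < min n cb.length := List.mem_range.mp hk
  rw [List.getD_eq_getElem?_getD, List.getD_eq_getElem?_getD,
    List.getElem?_take_of_lt (by omega)]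

-- The last start (B's starts[-1]) is A's final cursor.
theorem last_starts (bs : List Int) :
    PySem.List.pyGetD (0 :: bs.map (· + 1)) (-1) 0 = bs.getLastD (-1) + 1 := by
  rcases List.eq_nil_or_concat bs with rfl | ⟨l, a, rfl⟩
  · decide
  · rw [List.concat_eq_append]
    have h1 : (0 : Int) :: (l ++ [a]).map (· + 1) = (0 :: l.map (· + 1)) ++ [a + 1] := by simp
    rw [h1, PySem.List.pyGetD_neg_one_append_singleton]
    simp

-- Zipping the shifted starts against the boundary list plus the forced final end
-- is the zip over the boundaries followed by the final chapter.
theorem zip_snoc (bs : List Int) (x y : Int) :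
    (x :: bs.map (· + 1)).zip (bs ++ [y])
    = (x :: bs.dropLast.map (· + 1)).zip bs ++ [(bs.getLastD (x - 1) + 1, y)] := by
  induction bs generalizing x with
  | nil => simp
  | cons b bs ih =>
    cases bs with
    | nil => simp
    | cons b' bs' =>
      have := ih (b + 1)
      simp only [List.map_cons, List.cons_append, List.zip_cons_cons] at this ⊢
      rw [this]
      simp only [List.getLastD_cons, List.dropLast_cons₂, List.map_cons, List.zip_cons_cons,
        List.cons_append]

-- Dropping the last start before zipping against the boundaries alone.
theorem zip_dropLast (bs : List Int) (x : Int) :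
    (x :: bs.map (· + 1)).dropLast.zip bs = (x :: bs.dropLast.map (· + 1)).zip bs := by
  cases bs with
  | nil => simp
  | cons b bs =>
    simp [List.map_dropLast]

-- ===== VERDICT (by name: the statement is the Claim_ definition above) =====
theorem compute_chapter_ranges_spec : Claim_equal_compute_chapter_ranges := by
  intro cb tc _
  unfold Spec_compute_chapter_ranges compute_chapter_ranges compute_chapter_ranges_alt
  by_cases h : tc ≤ 0
  · simp [h]
  · simp only [h, if_false]
    have hn : tc = (tc.toNat : Int) := by omega
    set bs := (PySem.List.pyRange 0 tc 1).filter
      (fun i => decide (i < (cb.length : Int) ∧ PySem.List.pyGetD cb i false = true)) with hbs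
    have hb : ((PySem.List.enumerate (PySem.List.slice cb none (some tc))).filter
        (fun p => p.2)).map (fun p => p.1) = bs := by
      rw [hn, boundaries_eq, hbs, ← hn]
    have hfold :
        (PySem.List.pyRange 0 tc 1).foldl
          (fun (s : List (Int × Int) × Int) i =>
            if i < (cb.length : Int) ∧ PySem.List.pyGetD cb i false = true then
              (if i ≥ s.2 then s.1 ++ [(s.2, i)] else s.1, i + 1)
            else s) ([], 0)
        = bs.foldl (fun (s : List (Int × Int) × Int) b => (s.1 ++ [(s.2, b)], b + 1)) ([], 0) := by
      rw [← fold_guard_drop]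
      · rw [hbs, List.foldl_filter]
        congr 1
        funext s i
        by_cases hc : i < (cb.length : Int) ∧ PySem.List.pyGetD cb i false = true <;> simp [hc]
      · intro b hbmem
        have := PySem.List.mem_pyRange_one.mp (List.mem_of_mem_filter hbmem)
        omega
      · exact (PySem.List.pairwise_lt_pyRange_one 0 tc).filter _
    rw [hfold, fold_zip, hb, List.dropLast_concat]
    have hz : (0 : Int) - 1 = -1 := by ring
    rw [last_starts, hz]
    by_cases hc : bs.getLastD (-1) + 1 ≤ tc - 1
    · rw [if_pos hc, if_neg (by omega)]
      rw [zip_snoc, hz]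
      simp
    · rw [if_neg hc, if_pos (by omega)]
      rw [zip_dropLast]
      simp
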